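-- pv_equiv track=rewrite | github.com/GitHimanshuc/scripts | report/del.py | find_max_extents_for_domain_type
-- ===== SOURCE A (Python) =====
-- def find_max_extents_for_domain_type(parsed_dict, domain_type):
--   def max_vals_in_a_tuple(t1, t2):
--     return tuple(max(a, b) for a, b in zip(t1, t2))
--   max_extents = (0, 0, 0)
--   for domain_name in parsed_dict:
--     if domain_type in domain_name:
--       max_extents = max_vals_in_a_tuple(max_extents, parsed_dict[domain_name])
--   return max_extents
-- ===== SOURCE B (Python) =====
-- def find_max_extents_for_domain_type(parsed_dict, domain_type):
--   def go(items):
--     if not items: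
--       return (0, 0, 0)
--     if len(items) == 1:
--       name, (x, y, z) = items[0]
--       if domain_type in name:
--         return (max(0, x), max(0, y), max(0, z))
--       return (0, 0, 0)
--     mid = len(items) // 2
--     l = go(items[:mid])
--     r = go(items[mid:])
--     return (max(l[0], r[0]), max(l[1], r[1]), max(l[2], r[2]))
--   return go(list(parsed_dict.items()))
-- ===== Notes on version B (the rewrite author's own statement) =====
-- stated objective: alternative
-- what changed: Replaced A's single-pass incremental accumulator fold with a divide-and-conquer recursion: split the item list in half, recursively compute each half's max extents, and merge the two results with a pairwise max (correct because elementwise max is associative/commutative with identity (0,0,0)).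
import Mathlib
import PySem

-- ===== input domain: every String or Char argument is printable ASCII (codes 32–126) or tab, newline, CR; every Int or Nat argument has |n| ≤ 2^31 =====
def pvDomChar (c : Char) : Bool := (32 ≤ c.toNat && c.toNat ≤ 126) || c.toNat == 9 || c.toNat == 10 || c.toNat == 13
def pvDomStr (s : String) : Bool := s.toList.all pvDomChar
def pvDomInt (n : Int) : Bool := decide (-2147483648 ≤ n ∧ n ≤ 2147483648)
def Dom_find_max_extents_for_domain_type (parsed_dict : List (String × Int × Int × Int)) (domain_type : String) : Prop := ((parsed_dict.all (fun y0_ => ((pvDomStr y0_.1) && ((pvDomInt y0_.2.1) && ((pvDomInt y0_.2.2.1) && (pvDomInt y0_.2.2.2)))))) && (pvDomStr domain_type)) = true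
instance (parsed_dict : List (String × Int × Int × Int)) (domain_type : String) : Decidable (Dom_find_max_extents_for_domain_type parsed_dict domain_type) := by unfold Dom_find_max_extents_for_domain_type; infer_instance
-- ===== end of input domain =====

-- B replaces A's incremental accumulator fold with a divide-and-conquer recursion over the item list (alternative decomposition, same cost).


-- ===== PORT A =====
-- Port of A: fold over the dict's items, elementwise-maxing a (0,0,0) accumulator on matching keys.
def find_max_extents_for_domain_type (parsed_dict : List (String × Int × Int × Int)) (domain_type : String) : Int × Int × Int :=
  (PySem.Dict.ofList parsed_dict).items.foldl
    (fun acc kv =>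
      if PySem.Str.isIn domain_type kv.1 then
        (max acc.1 kv.2.1, max acc.2.1 kv.2.2.1, max acc.2.2 kv.2.2.2)
      else acc)
    (0, 0, 0)

-- ===== PORT B =====
-- Port of B's inner 'go': divide-and-conquer on the item list; items[:mid]/items[mid:] with
-- mid = len//2 are exactly List.take mid / List.drop mid (nonnegative in-range slice indices).
def pvGo (dt : String) (items : List (String × Int × Int × Int)) : Int × Int × Int :=
  match items with
  | [] => (0, 0, 0)
  | [kv] =>
    if PySem.Str.isIn dt kv.1 then (max 0 kv.2.1, max 0 kv.2.2.1, max 0 kv.2.2.2)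
    else (0, 0, 0)
  | a :: b :: rest =>
    let items' := a :: b :: rest
    let mid := items'.length / 2
    let l := pvGo dt (items'.take mid)
    let r := pvGo dt (items'.drop mid)
    (max l.1 r.1, max l.2.1 r.2.1, max l.2.2 r.2.2)
termination_by items.length
decreasing_by
  · simp [List.length_take]; omega
  · simp; omega

def find_max_extents_for_domain_type_alt (parsed_dict : List (String × Int × Int × Int)) (domain_type : String) : Int × Int × Int :=
  pvGo domain_type (PySem.Dict.ofList parsed_dict).items

-- ===== PRECONDITION & SPEC =====
def Spec_find_max_extents_for_domain_type (parsed_dict : List (String × Int × Int × Int)) (domain_type : String) (out : Int × Int × Int) : Prop := out = find_max_extents_for_domain_type_alt parsed_dict domain_type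
instance (parsed_dict : List (String × Int × Int × Int)) (domain_type : String) (out : Int × Int × Int) : Decidable (Spec_find_max_extents_for_domain_type parsed_dict domain_type out) := by unfold Spec_find_max_extents_for_domain_type; infer_instance

-- ===== CLAIM (what is proved, stated in full; the proofs are below) =====
def Claim_equal_find_max_extents_for_domain_type : Prop := ∀ (parsed_dict : List (String × Int × Int × Int)) (domain_type : String), Dom_find_max_extents_for_domain_type parsed_dict domain_type → Spec_find_max_extents_for_domain_type parsed_dict domain_type (find_max_extents_for_domain_type parsed_dict domain_type)

-- ===== LEMMAS AND PROOFS =====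
-- Common characterisation: the three column-wise maxes (seeded with 0) of the matching values.
def pvCols (dt : String) (l : List (String × Int × Int × Int)) : Int × Int × Int :=
  let vs := (l.filter (fun kv => PySem.Str.isIn dt kv.1)).map (·.2)
  ((vs.map (·.1)).foldl max 0, (vs.map (·.2.1)).foldl max 0, (vs.map (·.2.2)).foldl max 0)

-- A's accumulator fold equals pvCols seeded with the accumulator.
lemma fold_eq_cols (dt : String) :
    ∀ (l : List (String × Int × Int × Int)) (acc : Int × Int × Int),
      l.foldl
        (fun acc kv =>
          if PySem.Str.isIn dt kv.1 then
            (max acc.1 kv.2.1, max acc.2.1 kv.2.2.1, max acc.2.2 kv.2.2.2)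
          else acc)
        acc
      = ((((l.filter (fun kv => PySem.Str.isIn dt kv.1)).map (·.2)).map (·.1)).foldl max acc.1,
         (((l.filter (fun kv => PySem.Str.isIn dt kv.1)).map (·.2)).map (·.2.1)).foldl max acc.2.1,
         (((l.filter (fun kv => PySem.Str.isIn dt kv.1)).map (·.2)).map (·.2.2)).foldl max acc.2.2)
  | [], acc => rfl
  | kv :: rest, acc => by
    by_cases h : PySem.Str.isIn dt kv.1
    · simp only [List.foldl_cons, List.filter_cons, h, if_pos, List.map_cons]
      rw [fold_eq_cols dt rest]
    · simp only [List.foldl_cons, List.filter_cons, h, Bool.false_eq_true, ite_false]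
      rw [fold_eq_cols dt rest]

lemma foldl_max_shift : ∀ (xs : List Int) (a b : Int),
    xs.foldl max (max a b) = max a (xs.foldl max b)
  | [], a, b => rfl
  | x :: xs, a, b => by
    simp only [List.foldl_cons, max_assoc]
    exact foldl_max_shift xs a (max b x)

lemma le_foldl_max : ∀ (xs : List Int) (a : Int), a ≤ xs.foldl max a
  | [], a => le_refl a
  | x :: xs, a => le_trans (le_max_left a x) (le_foldl_max xs (max a x))

lemma foldl_max_append (xs ys : List Int) :
    (xs ++ ys).foldl max (0 : Int) = max (xs.foldl max 0) (ys.foldl max 0) := by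
  rw [List.foldl_append, ← foldl_max_shift, max_eq_left (le_foldl_max xs 0)]

-- B's divide-and-conquer equals pvCols.
lemma go_eq_cols (dt : String) : ∀ (l : List (String × Int × Int × Int)),
    pvGo dt l = pvCols dt l
  | [] => by simp [pvGo, pvCols]
  | [kv] => by
    by_cases h : PySem.Chars.isIn dt.toList kv.1.toList <;>
      simp [pvGo, pvCols, PySem.Str.isIn, h]
  | a :: b :: rest => by
    rw [pvGo]
    simp only [go_eq_cols dt ((a :: b :: rest).take ((a :: b :: rest).length / 2)),
      go_eq_cols dt ((a :: b :: rest).drop ((a :: b :: rest).length / 2))]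
    unfold pvCols
    have hsplit := List.take_append_drop ((a :: b :: rest).length / 2) (a :: b :: rest)
    conv_rhs => rw [← hsplit]
    simp only [List.filter_append, List.map_append, foldl_max_append]
termination_by l => l.length
decreasing_by
  · simp [List.length_take]; omega
  · simp; omega

-- ===== VERDICT (by name: the statement is the Claim_ definition above) =====
theorem find_max_extents_for_domain_type_spec : Claim_equal_find_max_extents_for_domain_type := by
  intro pd dt _
  unfold Spec_find_max_extents_for_domain_type find_max_extents_for_domain_type
    find_max_extents_for_domain_type_alt
  rw [go_eq_cols, fold_eq_cols]
  rfl
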